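-- pv_equiv track=rewrite | github.com/stenknutsen/HomeGrownPOSTagger | PhaseThreeTagging.py | MD_UNK_off_NounTagger
-- ===== SOURCE A (Python) =====
-- def MD_UNK_off_NounTagger(sent):
--     sentToReturn = []
--     skip = 0
--
--     for i in range(len(sent)):
--
--         if skip>0:
--             skip = skip -1
--             continue
--
--         if (i)<0 | (i+2)>=len(sent):
--             sentToReturn += [sent[i]]
--             continue
--
--         leftContext = sent[i]
--         target = sent[i+1]
--         rightContext = sent[i+2]
--
--         if (leftContext[1]=="MD")&(target[1]=="UNK")&(rightContext[1]=="UNK")&(rightContext[0].lower()=="off"):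
--
--             sentToReturn += [leftContext]
--             sentToReturn += [(target[0],"V")]
--             sentToReturn += [(rightContext[0],"RB")]
--             skip = 2
--
--         else:
--             sentToReturn += [leftContext]
--
--     return sentToReturn
-- ===== SOURCE B (Python) =====
-- def MD_UNK_off_NounTagger(sent):
--     n = len(sent)
--     matches = {i for i in range(n - 2)
--                if sent[i][1] == "MD" and sent[i + 1][1] == "UNK"
--                and sent[i + 2][1] == "UNK" and sent[i + 2][0].lower() == "off"}
--     out = []
--     j = 0
--     while j < n:
--         if j in matches:
--             out.append(sent[j])
--             out.append((sent[j + 1][0], "V"))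
--             out.append((sent[j + 2][0], "RB"))
--             j += 3
--         else:
--             out.append(sent[j])
--             j += 1
--     return out
-- ===== Notes on version B (the rewrite author's own statement) =====
-- stated objective: alternative
-- what changed: Replaces A's single pass with a mutable skip counter by a two-phase algorithm: first precompute the set of trigram match start positions, then walk an explicit index that jumps by 3 at a match and by 1 otherwise.
import Mathlib
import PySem

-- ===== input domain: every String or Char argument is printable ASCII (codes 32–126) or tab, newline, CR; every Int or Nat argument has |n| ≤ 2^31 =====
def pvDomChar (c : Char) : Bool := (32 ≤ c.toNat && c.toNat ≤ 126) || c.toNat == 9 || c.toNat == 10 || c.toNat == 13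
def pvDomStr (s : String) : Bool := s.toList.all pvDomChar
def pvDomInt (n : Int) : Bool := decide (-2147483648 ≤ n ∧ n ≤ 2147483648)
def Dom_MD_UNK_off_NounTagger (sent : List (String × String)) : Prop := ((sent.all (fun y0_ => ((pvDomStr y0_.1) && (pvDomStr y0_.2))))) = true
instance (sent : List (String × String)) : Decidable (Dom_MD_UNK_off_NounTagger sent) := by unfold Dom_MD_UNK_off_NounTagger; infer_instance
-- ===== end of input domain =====

-- B replaces A's one pass with a skip counter by two phases: precompute the set of
-- trigram-match start positions, then walk an index that jumps by 3 at a match (objective: alternative).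

-- ===== PORT A =====
-- loop body of A's for-loop; state = (sentToReturn, skip). Indices passed to pyGetD
-- are in range on every reachable call (guarded by the chained comparison), so pyGetD is exact.
def pvStepA (sent : List (String × String)) (st : List (String × String) × Int) (i : Int) :
    List (String × String) × Int :=
  let acc := st.1
  let skip := st.2
  if skip > 0 then (acc, skip - 1)
  else if i < PySem.Int.bor 0 (i+2) ∧ PySem.Int.bor 0 (i+2) ≥ (sent.length : Int) then
    (acc ++ [PySem.List.pyGetD sent i ("", "")], skip)
  else
    let leftContext := PySem.List.pyGetD sent i ("", "")
    let target := PySem.List.pyGetD sent (i+1) ("", "")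
    let rightContext := PySem.List.pyGetD sent (i+2) ("", "")
    if leftContext.2 == "MD" && target.2 == "UNK" && rightContext.2 == "UNK"
        && PySem.Str.lower rightContext.1 == "off" then
      (acc ++ [leftContext] ++ [(target.1, "V")] ++ [(rightContext.1, "RB")], 2)
    else
      (acc ++ [leftContext], skip)

def MD_UNK_off_NounTagger (sent : List (String × String)) : List (String × String) :=
  ((PySem.List.pyRange 0 (sent.length : Int) 1).foldl (pvStepA sent) ([], 0)).1

-- ===== PORT B =====
-- phase 1: set of start positions of MD-UNK-UNK/"off" trigrams
def pvMatchCond (sent : List (String × String)) (i : Int) : Bool :=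
  (PySem.List.pyGetD sent i ("", "")).2 == "MD"
    && (PySem.List.pyGetD sent (i+1) ("", "")).2 == "UNK"
    && (PySem.List.pyGetD sent (i+2) ("", "")).2 == "UNK"
    && PySem.Str.lower (PySem.List.pyGetD sent (i+2) ("", "")).1 == "off"

def pvMatchesB (sent : List (String × String)) : PySem.Set Int :=
  PySem.Set.ofList ((PySem.List.pyRange 0 ((sent.length : Int) - 2) 1).filter (pvMatchCond sent))

-- phase 2: the while loop over index j
def pvWalkB (sent : List (String × String)) (ms : PySem.Set Int) (j : Int) :
    List (String × String) :=
  if h : j < (sent.length : Int) then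
    if ms.contains j then
      PySem.List.pyGetD sent j ("", "")
        :: ((PySem.List.pyGetD sent (j+1) ("", "")).1, "V")
        :: ((PySem.List.pyGetD sent (j+2) ("", "")).1, "RB")
        :: pvWalkB sent ms (j+3)
    else
      PySem.List.pyGetD sent j ("", "") :: pvWalkB sent ms (j+1)
  else []
termination_by ((sent.length : Int) - j).toNat
decreasing_by all_goals omega

def MD_UNK_off_NounTagger_alt (sent : List (String × String)) : List (String × String) :=
  pvWalkB sent (pvMatchesB sent) 0

-- ===== PRECONDITION & SPEC =====
def Spec_MD_UNK_off_NounTagger (sent : List (String × String)) (out : List (String × String)) : Prop := out = MD_UNK_off_NounTagger_alt sent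
instance (sent : List (String × String)) (out : List (String × String)) : Decidable (Spec_MD_UNK_off_NounTagger sent out) := by unfold Spec_MD_UNK_off_NounTagger; infer_instance

-- ===== CLAIM (what is proved, stated in full; the proofs are below) =====
def Claim_equal_MD_UNK_off_NounTagger : Prop := ∀ (sent : List (String × String)), Dom_MD_UNK_off_NounTagger sent → Spec_MD_UNK_off_NounTagger sent (MD_UNK_off_NounTagger sent)

-- ===== LEMMAS AND PROOFS =====

theorem pvBorZero (x : Int) : PySem.Int.bor 0 x = x := by
  rw [PySem.Int.bor_comm]; exact PySem.Int.bor_zero x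

-- membership in the precomputed set ↔ in-bounds and the trigram condition
theorem pvMemMatches (sent : List (String × String)) (j : Int) :
    (pvMatchesB sent).contains j = true ↔
      0 ≤ j ∧ j + 2 < (sent.length : Int) ∧ pvMatchCond sent j = true := by
  rw [PySem.Set.contains_iff]
  unfold pvMatchesB
  rw [PySem.Set.mem_ofList, List.mem_filter, PySem.List.mem_pyRange_one]
  constructor
  · rintro ⟨⟨h1, h2⟩, h3⟩; exact ⟨h1, by omega, h3⟩
  · rintro ⟨h1, h2, h3⟩; exact ⟨⟨h1, by omega⟩, h3⟩

-- main loop correspondence: for 0 ≤ j, A's fold over range(j, n) starting with skip = 0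
-- produces acc ++ B's walk from j
theorem pvMain (sent : List (String × String)) (j : Int) (hj : 0 ≤ j)
    (acc : List (String × String)) :
    (PySem.List.pyRange j (sent.length : Int) 1).foldl (pvStepA sent) (acc, 0)
      = (acc ++ pvWalkB sent (pvMatchesB sent) j, 0) := by
  by_cases hlt : j < (sent.length : Int)
  · rw [PySem.List.pyRange_one_cons hlt]
    by_cases hm : (pvMatchesB sent).contains j = true
    · -- match at j: A appends three tokens and skips two iterations
      obtain ⟨h0, h2, hc⟩ := (pvMemMatches sent j).1 hm
      have hstep : pvStepA sent (acc, 0) j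
          = (acc ++ [PySem.List.pyGetD sent j ("", "")]
              ++ [((PySem.List.pyGetD sent (j+1) ("", "")).1, "V")]
              ++ [((PySem.List.pyGetD sent (j+2) ("", "")).1, "RB")], 2) := by
        unfold pvStepA
        simp only [pvBorZero]
        rw [if_neg (by omega : ¬ (0:Int) > 0),
            if_neg (by omega : ¬ (j < j + 2 ∧ j + 2 ≥ (sent.length : Int)))]
        unfold pvMatchCond at hc
        simp only [hc, if_true]
      rw [List.foldl_cons, hstep]
      rw [PySem.List.pyRange_one_cons (by omega : j + 1 < (sent.length : Int)),
          List.foldl_cons]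
      have hs1 : ∀ (l : List (String × String)), pvStepA sent (l, 2) (j+1) = (l, 1) := by
        intro l; unfold pvStepA; norm_num
      have hs2 : ∀ (l : List (String × String)), pvStepA sent (l, 1) (j+2) = (l, 0) := by
        intro l; unfold pvStepA; norm_num
      rw [hs1, show j + 1 + 1 = j + 2 from by ring]
      rw [PySem.List.pyRange_one_cons (by omega : j + 2 < (sent.length : Int)),
          List.foldl_cons, hs2, show j + 2 + 1 = j + 3 from by ring]
      rw [pvMain sent (j+3) (by omega)]
      conv_rhs => rw [pvWalkB]
      rw [dif_pos hlt, if_pos hm]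
      simp
    · -- no match at j: A emits sent[j] and moves on
      have hstep : pvStepA sent (acc, 0) j = (acc ++ [PySem.List.pyGetD sent j ("", "")], 0) := by
        unfold pvStepA
        simp only [pvBorZero]
        rw [if_neg (by omega : ¬ (0:Int) > 0)]
        by_cases h2 : j + 2 ≥ (sent.length : Int)
        · rw [if_pos ⟨by omega, h2⟩]
        · rw [if_neg (by omega : ¬ (j < j + 2 ∧ j + 2 ≥ (sent.length : Int)))]
          have hc : pvMatchCond sent j = false := by
            rcases hcc : pvMatchCond sent j
            · rfl
            · exact absurd ((pvMemMatches sent j).2 ⟨hj, by omega, hcc⟩) hm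
          unfold pvMatchCond at hc
          simp [hc]
      rw [List.foldl_cons, hstep]
      rw [pvMain sent (j+1) (by omega)]
      conv_rhs => rw [pvWalkB]
      rw [dif_pos hlt, if_neg hm]
      simp
  · rw [PySem.List.pyRange_one_eq_nil (by omega)]
    rw [pvWalkB, dif_neg hlt]
    simp
termination_by ((sent.length : Int) - j).toNat
decreasing_by all_goals omega

-- ===== VERDICT (by name: the statement is the Claim_ definition above) =====
theorem MD_UNK_off_NounTagger_spec : Claim_equal_MD_UNK_off_NounTagger := by
  intro sent _
  unfold Spec_MD_UNK_off_NounTagger MD_UNK_off_NounTagger MD_UNK_off_NounTagger_alt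
  rw [pvMain sent 0 le_rfl []]
  simp
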